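-- pv_equiv track=rewrite | github.com/sethatron/agent-skills | dispatch/scripts/morning_dashboard.py | severity_abbrev
-- ===== SOURCE A (Python) =====
-- def severity_abbrev(findings):
--     counts = {"critical": 0, "major": 0, "minor": 0, "suggestion": 0}
--     for f in findings:
--         s = (f.get("severity") or "").lower()
--         if s in counts:
--             counts[s] += 1
--     parts = []
--     if counts["critical"]:
--         parts.append(f"**{counts['critical']}C**")
--     if counts["major"]:
--         parts.append(f"{counts['major']}M")
--     if counts["minor"]:
--         parts.append(f"{counts['minor']}m")
--     if counts["suggestion"]:
--         parts.append(f"{counts['suggestion']}s")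
--     return " ".join(parts) or "—"
-- ===== SOURCE B (Python) =====
-- def severity_abbrev(findings):
--     def tally(name):
--         return sum(1 for f in findings if (f.get("severity") or "").lower() == name)
--     crit = tally("critical")
--     major = tally("major")
--     minor = tally("minor")
--     sugg = tally("suggestion")
--     parts = ([f"**{crit}C**"] if crit else []) \
--         + ([f"{major}M"] if major else []) \
--         + ([f"{minor}m"] if minor else []) \
--         + ([f"{sugg}s"] if sugg else [])
--     return " ".join(parts) or "—"
-- ===== Notes on version B (the rewrite author's own statement) =====
-- stated objective: alternative
-- what changed: Replaces the single-pass mutable counts-dict tally with four independent filtered-count passes (one per severity) and builds the parts list by concatenating optional singleton lists from those scalars.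
import Mathlib
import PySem

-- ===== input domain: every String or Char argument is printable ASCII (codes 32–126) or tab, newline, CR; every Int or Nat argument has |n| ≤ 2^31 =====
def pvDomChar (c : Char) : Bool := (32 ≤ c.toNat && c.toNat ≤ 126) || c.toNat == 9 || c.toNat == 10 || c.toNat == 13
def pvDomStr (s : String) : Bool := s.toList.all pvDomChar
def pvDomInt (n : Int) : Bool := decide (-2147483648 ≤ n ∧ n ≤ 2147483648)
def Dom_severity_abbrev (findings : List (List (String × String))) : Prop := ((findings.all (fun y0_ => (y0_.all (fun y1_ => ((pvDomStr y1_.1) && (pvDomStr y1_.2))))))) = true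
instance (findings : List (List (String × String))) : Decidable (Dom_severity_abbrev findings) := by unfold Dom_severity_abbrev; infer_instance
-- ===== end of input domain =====

-- B replaces A's single-pass mutable counts-dict tally with four independent filtered counts (one per severity); same output, different decomposition.


-- shared sub-expression of both Pythons: (f.get("severity") or "").lower()
def pySeverity (f : List (String × String)) : String :=
  PySem.Str.lower (((PySem.Dict.mk f).get? "severity").getD "")

-- ===== PORT A =====
-- the body of A's 'for f in findings' loop: if s in counts: counts[s] += 1
def sevStep (counts : PySem.Dict String Int) (f : List (String × String)) : PySem.Dict String Int :=
  let s := pySeverity f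
  if counts.contains s then counts.modify s 0 (· + 1) else counts

def severity_abbrev (findings : List (List (String × String))) : String :=
  let counts0 : PySem.Dict String Int :=
    PySem.Dict.ofList [("critical", 0), ("major", 0), ("minor", 0), ("suggestion", 0)]
  let counts := findings.foldl sevStep counts0
  let parts : List String := []
  let parts := if counts.getD "critical" 0 ≠ 0 then
    parts ++ ["**" ++ PySem.Int.toStr (counts.getD "critical" 0) ++ "C**"] else parts
  let parts := if counts.getD "major" 0 ≠ 0 then
    parts ++ [PySem.Int.toStr (counts.getD "major" 0) ++ "M"] else parts
  let parts := if counts.getD "minor" 0 ≠ 0 then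
    parts ++ [PySem.Int.toStr (counts.getD "minor" 0) ++ "m"] else parts
  let parts := if counts.getD "suggestion" 0 ≠ 0 then
    parts ++ [PySem.Int.toStr (counts.getD "suggestion" 0) ++ "s"] else parts
  let r := PySem.Str.join " " parts
  if r = "" then "—" else r

-- ===== PORT B =====
def severity_abbrev_alt (findings : List (List (String × String))) : String :=
  let tally : String → Int := fun name =>
    (findings.countP (fun f => pySeverity f == name) : Int)
  let crit := tally "critical"
  let major := tally "major"
  let minor := tally "minor"
  let sugg := tally "suggestion"
  let parts :=
    (if crit ≠ 0 then ["**" ++ PySem.Int.toStr crit ++ "C**"] else [])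
    ++ (if major ≠ 0 then [PySem.Int.toStr major ++ "M"] else [])
    ++ (if minor ≠ 0 then [PySem.Int.toStr minor ++ "m"] else [])
    ++ (if sugg ≠ 0 then [PySem.Int.toStr sugg ++ "s"] else [])
  let r := PySem.Str.join " " parts
  if r = "" then "—" else r

-- ===== PRECONDITION & SPEC =====
def Spec_severity_abbrev (findings : List (List (String × String))) (out : String) : Prop := out = severity_abbrev_alt findings
instance (findings : List (List (String × String))) (out : String) : Decidable (Spec_severity_abbrev findings out) := by unfold Spec_severity_abbrev; infer_instance

-- ===== CLAIM (what is proved, stated in full; the proofs are below) =====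
def Claim_equal_severity_abbrev : Prop := ∀ (findings : List (List (String × String))), Dom_severity_abbrev findings → Spec_severity_abbrev findings (severity_abbrev findings)

-- ===== LEMMAS AND PROOFS =====

theorem sevStep_crit (a b c d : Int) (f : List (String × String)) (h : pySeverity f = "critical") :
    sevStep (PySem.Dict.mk [("critical", a), ("major", b), ("minor", c), ("suggestion", d)]) f =
    PySem.Dict.mk [("critical", a + 1), ("major", b), ("minor", c), ("suggestion", d)] := by
  simp [sevStep, h, PySem.Dict.contains, PySem.Dict.modify, PySem.Dict.insert, PySem.Dict.getD, PySem.Dict.get?]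

theorem sevStep_major (a b c d : Int) (f : List (String × String)) (h : pySeverity f = "major") :
    sevStep (PySem.Dict.mk [("critical", a), ("major", b), ("minor", c), ("suggestion", d)]) f =
    PySem.Dict.mk [("critical", a), ("major", b + 1), ("minor", c), ("suggestion", d)] := by
  simp [sevStep, h, PySem.Dict.contains, PySem.Dict.modify, PySem.Dict.insert, PySem.Dict.getD, PySem.Dict.get?]

theorem sevStep_minor (a b c d : Int) (f : List (String × String)) (h : pySeverity f = "minor") :
    sevStep (PySem.Dict.mk [("critical", a), ("major", b), ("minor", c), ("suggestion", d)]) f =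
    PySem.Dict.mk [("critical", a), ("major", b), ("minor", c + 1), ("suggestion", d)] := by
  simp [sevStep, h, PySem.Dict.contains, PySem.Dict.modify, PySem.Dict.insert, PySem.Dict.getD, PySem.Dict.get?]

theorem sevStep_sugg (a b c d : Int) (f : List (String × String)) (h : pySeverity f = "suggestion") :
    sevStep (PySem.Dict.mk [("critical", a), ("major", b), ("minor", c), ("suggestion", d)]) f =
    PySem.Dict.mk [("critical", a), ("major", b), ("minor", c), ("suggestion", d + 1)] := by
  simp [sevStep, h, PySem.Dict.contains, PySem.Dict.modify, PySem.Dict.insert, PySem.Dict.getD, PySem.Dict.get?]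

theorem sevStep_miss (a b c d : Int) (f : List (String × String))
    (h1 : pySeverity f ≠ "critical") (h2 : pySeverity f ≠ "major")
    (h3 : pySeverity f ≠ "minor") (h4 : pySeverity f ≠ "suggestion") :
    sevStep (PySem.Dict.mk [("critical", a), ("major", b), ("minor", c), ("suggestion", d)]) f =
    PySem.Dict.mk [("critical", a), ("major", b), ("minor", c), ("suggestion", d)] := by
  have hc : (PySem.Dict.mk [("critical", a), ("major", b), ("minor", c), ("suggestion", d)]).contains (pySeverity f) = false := by
    simp [PySem.Dict.contains]
    exact ⟨fun h => h1 h.symm, fun h => h2 h.symm, fun h => h3 h.symm, fun h => h4 h.symm⟩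
  simp [sevStep, hc]

-- A's counting loop, for a general accumulator of the fixed four-key shape
theorem loop_eq (findings : List (List (String × String))) (a b c d : Int) :
    findings.foldl sevStep
      (PySem.Dict.mk [("critical", a), ("major", b), ("minor", c), ("suggestion", d)]) =
    PySem.Dict.mk [("critical", a + (findings.countP (fun f => pySeverity f == "critical") : Int)),
                   ("major", b + (findings.countP (fun f => pySeverity f == "major") : Int)),
                   ("minor", c + (findings.countP (fun f => pySeverity f == "minor") : Int)),
                   ("suggestion", d + (findings.countP (fun f => pySeverity f == "suggestion") : Int))] := by
  induction findings generalizing a b c d with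
  | nil => simp
  | cons f fs ih =>
    rw [List.foldl_cons]
    by_cases h1 : pySeverity f = "critical"
    · rw [sevStep_crit a b c d f h1, ih]
      simp [h1]; omega
    · by_cases h2 : pySeverity f = "major"
      · rw [sevStep_major a b c d f h2, ih]
        simp [h2]; omega
      · by_cases h3 : pySeverity f = "minor"
        · rw [sevStep_minor a b c d f h3, ih]
          simp [h3]; omega
        · by_cases h4 : pySeverity f = "suggestion"
          · rw [sevStep_sugg a b c d f h4, ih]
            simp [h4]; omega
          · rw [sevStep_miss a b c d f h1 h2 h3 h4, ih]
            simp [h1, h2, h3, h4]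

theorem counts0_eq :
    (PySem.Dict.ofList [("critical", (0:Int)), ("major", 0), ("minor", 0), ("suggestion", 0)]) =
    PySem.Dict.mk [("critical", 0), ("major", 0), ("minor", 0), ("suggestion", 0)] := by
  decide

theorem getD_crit (a b c d : Int) :
    (PySem.Dict.mk [("critical", a), ("major", b), ("minor", c), ("suggestion", d)]).getD "critical" 0 = a := by
  simp [PySem.Dict.getD, PySem.Dict.get?]

theorem getD_major (a b c d : Int) :
    (PySem.Dict.mk [("critical", a), ("major", b), ("minor", c), ("suggestion", d)]).getD "major" 0 = b := by
  simp [PySem.Dict.getD, PySem.Dict.get?]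

theorem getD_minor (a b c d : Int) :
    (PySem.Dict.mk [("critical", a), ("major", b), ("minor", c), ("suggestion", d)]).getD "minor" 0 = c := by
  simp [PySem.Dict.getD, PySem.Dict.get?]

theorem getD_sugg (a b c d : Int) :
    (PySem.Dict.mk [("critical", a), ("major", b), ("minor", c), ("suggestion", d)]).getD "suggestion" 0 = d := by
  simp [PySem.Dict.getD, PySem.Dict.get?]

theorem join_parts_eq (c m mi s : Int) (x y z w : String) :
  (let parts : List String := [];
   let parts := if c ≠ 0 then parts ++ [x] else parts;
   let parts := if m ≠ 0 then parts ++ [y] else parts;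
   let parts := if mi ≠ 0 then parts ++ [z] else parts;
   let parts := if s ≠ 0 then parts ++ [w] else parts;
   let r := PySem.Str.join " " parts;
   if r = "" then "—" else r) =
  (let parts := (if c ≠ 0 then [x] else []) ++ (if m ≠ 0 then [y] else []) ++ (if mi ≠ 0 then [z] else []) ++ (if s ≠ 0 then [w] else []);
   let r := PySem.Str.join " " parts;
   if r = "" then "—" else r) := by
  split_ifs <;> rfl

-- ===== VERDICT (by name: the statement is the Claim_ definition above) =====
theorem severity_abbrev_spec : Claim_equal_severity_abbrev := by
  intro findings _
  show severity_abbrev findings = severity_abbrev_alt findings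
  simp only [severity_abbrev, severity_abbrev_alt]
  rw [counts0_eq, loop_eq, getD_crit, getD_major, getD_minor, getD_sugg]
  simp only [zero_add]
  exact join_parts_eq _ _ _ _ _ _ _ _
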